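-- pv_equiv track=rewrite | github.com/seifreed/r2inspect | r2inspect/domain/services/function_analysis.py | group_functions_by_machoc_hash
-- ===== SOURCE A (Python) =====
-- def group_functions_by_machoc_hash(machoc_hashes: dict[str, str] | None) -> dict[str, list[str]]:
--     """Group functions that share the same MACHOC hash."""
--     if not machoc_hashes:
--         return {}
--
--     hash_to_functions: dict[str, list[str]] = {}
--     for func_name, machoc_hash in machoc_hashes.items():
--         hash_to_functions.setdefault(machoc_hash, []).append(func_name)
--
--     return {
--         hash_value: functions
--         for hash_value, functions in hash_to_functions.items()
--         if len(functions) > 1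
--     }
-- ===== SOURCE B (Python) =====
-- def group_functions_by_machoc_hash(machoc_hashes):
--     """Group functions that share the same MACHOC hash."""
--     if not machoc_hashes:
--         return {}
--
--     items = list(machoc_hashes.items())
--     result = {}
--     seen = []
--     for _, machoc_hash in items:
--         if machoc_hash in seen:
--             continue
--         seen.append(machoc_hash)
--         group = [name for name, h in items if h == machoc_hash]
--         if len(group) > 1:
--             result[machoc_hash] = group
--     return result
-- ===== Notes on version B (the rewrite author's own statement) =====
-- stated objective: alternative
-- what changed: A builds a hash-indexed grouping dict in one pass and then filters it to groups of size > 1; B uses no grouping dict at all: it walks the items keeping a plain 'seen' list of hashes and, at each hash's first occurrence, gathers that hash's whole group by rescanning the items, emitting it only if it has more than one member.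
import Mathlib
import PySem

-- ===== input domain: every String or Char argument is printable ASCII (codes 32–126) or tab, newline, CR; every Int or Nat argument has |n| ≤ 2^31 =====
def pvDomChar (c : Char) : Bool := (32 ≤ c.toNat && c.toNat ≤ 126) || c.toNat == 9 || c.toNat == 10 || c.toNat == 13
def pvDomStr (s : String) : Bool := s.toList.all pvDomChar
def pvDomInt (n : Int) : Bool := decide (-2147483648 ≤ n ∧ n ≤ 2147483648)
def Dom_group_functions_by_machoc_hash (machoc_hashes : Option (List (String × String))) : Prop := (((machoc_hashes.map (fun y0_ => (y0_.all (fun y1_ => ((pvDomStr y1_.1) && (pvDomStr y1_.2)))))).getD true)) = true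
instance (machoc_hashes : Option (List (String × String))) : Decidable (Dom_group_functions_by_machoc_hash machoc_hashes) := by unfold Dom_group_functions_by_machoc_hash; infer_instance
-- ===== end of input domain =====

-- B drops A's hash-indexed grouping dict entirely: it walks the items once keeping a 'seen' list
-- of hashes and, for each hash at its first occurrence, gathers its whole group by rescanning
-- the items, emitting it only if it has more than one member (objective: alternative).

-- ===== PORT A =====
def group_functions_by_machoc_hash (machoc_hashes : Option (List (String × String))) : List (String × List String) :=
  match machoc_hashes with
  | none => []                                  -- 'if not machoc_hashes: return {}' (None case)
  | some m =>
    if m.isEmpty then []                        -- 'if not machoc_hashes: return {}' (empty dict case)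
    else
      -- hash_to_functions.setdefault(machoc_hash, []).append(func_name)
      let hash_to_functions : PySem.Dict String (List String) :=
        m.foldl (fun d p => d.modify p.2 [] (fun fs => fs ++ [p.1])) PySem.Dict.empty
      -- final dict comprehension keeping only groups with len > 1
      hash_to_functions.items.filter (fun q => decide (1 < q.2.length))

-- ===== PORT B =====
def group_functions_by_machoc_hash_alt (machoc_hashes : Option (List (String × String))) : List (String × List String) :=
  match machoc_hashes with
  | none => []                                  -- 'if not machoc_hashes: return {}' (None case)
  | some m =>
    if m.isEmpty then []                        -- 'if not machoc_hashes: return {}' (empty dict case)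
    else
      -- for _, machoc_hash in items: skip seen hashes, else gather the group by rescanning items
      (m.foldl (fun (st : List String × List (String × List String)) p =>
          if p.2 ∈ st.1 then st                 -- 'if machoc_hash in seen: continue'
          else
            let group := (m.filter (fun q => q.2 == p.2)).map (·.1)   -- '[name for name, h in items if h == machoc_hash]'
            (st.1 ++ [p.2],                      -- 'seen.append(machoc_hash)'
             if 1 < group.length then st.2 ++ [(p.2, group)] else st.2))  -- 'if len(group) > 1: result[machoc_hash] = group'
        (([] : List String), ([] : List (String × List String)))).2

-- ===== PRECONDITION & SPEC =====
def Spec_group_functions_by_machoc_hash (machoc_hashes : Option (List (String × String))) (out : List (String × List String)) : Prop := out = group_functions_by_machoc_hash_alt machoc_hashes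
instance (machoc_hashes : Option (List (String × String))) (out : List (String × List String)) : Decidable (Spec_group_functions_by_machoc_hash machoc_hashes out) := by unfold Spec_group_functions_by_machoc_hash; infer_instance

-- ===== CLAIM (what is proved, stated in full; the proofs are below) =====
def Claim_equal_group_functions_by_machoc_hash : Prop := ∀ (machoc_hashes : Option (List (String × String))), Dom_group_functions_by_machoc_hash machoc_hashes → Spec_group_functions_by_machoc_hash machoc_hashes (group_functions_by_machoc_hash machoc_hashes)

-- ===== LEMMAS AND PROOFS =====

-- A's grouping fold, characterised: keys in first-occurrence order of the hashes,
-- each key paired with all its names in order.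
lemma groupItems (m : List (String × String)) :
    (m.foldl (fun d p => d.modify p.2 [] (fun fs => fs ++ [p.1]))
      (PySem.Dict.empty : PySem.Dict String (List String))).items
    = (PySem.Set.ofList (m.map (·.2))).map
        (fun k => (k, (m.filter (fun p => p.2 == k)).map (·.1))) := by
  set D := m.foldl (fun d p => d.modify p.2 [] (fun fs => fs ++ [p.1]))
      (PySem.Dict.empty : PySem.Dict String (List String)) with hD
  have hnd : D.keys.Nodup := by
    rw [hD]
    exact PySem.Dict.nodup_keys_foldl_modify_key m (·.2) [] (fun d p fs => fs ++ [p.1]) _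
      (by simp [PySem.Dict.keys_empty])
  have hkeys : D.keys = PySem.Set.ofList (m.map (·.2)) := by
    rw [hD, PySem.Dict.keys_foldl_modify_key m (·.2) [] (fun d p fs => fs ++ [p.1])]
    simp [PySem.Dict.keys_empty, PySem.Set.update_nil_left]
  have hget : ∀ k, D.getD k [] = (m.filter (fun p => p.2 == k)).map (·.1) := by
    intro k
    have h := PySem.Dict.getD_foldl_modify_append (m.map (fun p => (p.2, p.1)))
      (PySem.Dict.empty : PySem.Dict String (List String)) k
    rw [List.foldl_map] at h
    simpa [List.filter_map, Function.comp, PySem.Dict.getD_empty] using h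
  rw [PySem.Dict.items_eq_map_keys D hnd [], hkeys]
  simp only [hget]

-- Set.add only appends, so the start list stays a prefix of the fold.
lemma prefix_foldl_add (l : List String) : ∀ (s : List String),
    s <+: l.foldl PySem.Set.add s := by
  induction l with
  | nil => intro s; simp
  | cons x l ih =>
    intro s
    refine List.IsPrefix.trans ?_ (ih (PySem.Set.add s x))
    by_cases hx : x ∈ s <;> simp [PySem.Set.add, PySem.Set.contains, hx]

-- B's loop, characterised: the result is the flatMap of F over the newly seen hashes,
-- which are exactly what Set.add-folding appends after the start list s.
lemma loop_char (F : String → List (String × List String)) (l : List String) :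
    ∀ (s : List String) (r : List (String × List String)),
      (l.foldl (fun (st : List String × List (String × List String)) h =>
          if h ∈ st.1 then st else (st.1 ++ [h], st.2 ++ F h)) (s, r)).2
      = r ++ ((l.foldl PySem.Set.add s).drop s.length).flatMap F := by
  induction l with
  | nil => intro s r; simp
  | cons x l ih =>
    intro s r
    by_cases hx : x ∈ s
    · have hx' : PySem.Set.add s x = s := by
        simp [PySem.Set.add, PySem.Set.contains, hx]
      simp only [List.foldl_cons, if_pos hx, hx', ih]
    · have hx' : PySem.Set.add s x = s ++ [x] := by
        simp [PySem.Set.add, PySem.Set.contains, hx]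
      simp only [List.foldl_cons, if_neg hx, hx', ih]
      obtain ⟨t, ht⟩ := prefix_foldl_add l (s ++ [x])
      rw [← ht]
      simp

-- filter-after-map as a flatMap of an if.
lemma flatMap_if_eq_filter_map (g : String → String × List String)
    (c : String → Prop) [DecidablePred c]
    (p : String × List String → Bool) (hpg : ∀ k, p (g k) = decide (c k)) :
    ∀ (l : List String), (l.flatMap (fun k => if c k then [g k] else [])) = (l.map g).filter p := by
  intro l
  induction l with
  | nil => rfl
  | cons x l ih =>
    by_cases hx : c x <;>
      simp [List.flatMap_cons, hpg, hx, ih]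

-- ===== VERDICT (by name: the statement is the Claim_ definition above) =====
theorem group_functions_by_machoc_hash_spec : Claim_equal_group_functions_by_machoc_hash := by
  intro machoc_hashes _
  unfold Spec_group_functions_by_machoc_hash
  unfold group_functions_by_machoc_hash group_functions_by_machoc_hash_alt
  cases machoc_hashes with
  | none => rfl
  | some m =>
    by_cases hm : m.isEmpty
    · simp [hm]
    · simp only [hm]
      set g : String → String × List String :=
        fun k => (k, (m.filter (fun p => p.2 == k)).map (·.1)) with hg
      set F : String → List (String × List String) :=
        fun k => if 1 < ((m.filter (fun p => p.2 == k)).map (·.1)).length then [g k] else []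
        with hF
      -- B's step, rewritten to the (st.1 ++ [h], st.2 ++ F h) shape on the second component
      have hBstep : (fun (st : List String × List (String × List String)) (p : String × String) =>
            if p.2 ∈ st.1 then st
            else
              let group := (m.filter (fun q => q.2 == p.2)).map (·.1)
              (st.1 ++ [p.2],
               if 1 < group.length then st.2 ++ [(p.2, group)] else st.2))
          = (fun st p => if p.2 ∈ st.1 then st else (st.1 ++ [p.2], st.2 ++ F p.2)) := by
        funext st p
        by_cases hp : p.2 ∈ st.1
        · simp [hp]
        · simp only [if_neg hp, hF, hg]
          split <;> rename_i h <;> simp_all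
      rw [hBstep]
      have hfold : m.foldl (fun (st : List String × List (String × List String)) p =>
            if p.2 ∈ st.1 then st else (st.1 ++ [p.2], st.2 ++ F p.2)) ([], [])
          = (m.map (·.2)).foldl (fun st h =>
            if h ∈ st.1 then st else (st.1 ++ [h], st.2 ++ F h)) ([], []) := by
        rw [List.foldl_map]
      rw [hfold, loop_char F (m.map (·.2)) [] []]
      rw [groupItems]
      rw [← flatMap_if_eq_filter_map g
            (fun k => 1 < ((m.filter (fun p => p.2 == k)).map (·.1)).length)
            (fun q => decide (1 < q.2.length)) (by intro k; simp [hg])]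
      simp [PySem.Set.ofList_eq_foldl, hF]
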